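-- pv_equiv track=rewrite | github.com/smazik02/AiSD_L1_sort | Python/pokaz.py | vshape
-- ===== SOURCE A (Python) =====
-- def vshape(n):
--     x = int(n/2)
--     left = [0]*x
--     right = [0]*x
--     for i in range(x):
--         right[i] = i
--     for i in range(x):
--         left[i] = i
--     left.reverse()
--     return left+right
-- ===== SOURCE B (Python) =====
-- def vshape(n):
--     x = int(n/2)
--     return [abs(2*j - (2*x - 1)) // 2 for j in range(2*x)]
-- ===== Notes on version B (the rewrite author's own statement) =====
-- stated objective: simpler
-- what changed: Replaces the two half-lists (two fill loops, a reverse and a concatenation) by a single comprehension computing each V-shape entry from the closed form abs(2*j-(2*x-1))//2.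
import Mathlib
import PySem

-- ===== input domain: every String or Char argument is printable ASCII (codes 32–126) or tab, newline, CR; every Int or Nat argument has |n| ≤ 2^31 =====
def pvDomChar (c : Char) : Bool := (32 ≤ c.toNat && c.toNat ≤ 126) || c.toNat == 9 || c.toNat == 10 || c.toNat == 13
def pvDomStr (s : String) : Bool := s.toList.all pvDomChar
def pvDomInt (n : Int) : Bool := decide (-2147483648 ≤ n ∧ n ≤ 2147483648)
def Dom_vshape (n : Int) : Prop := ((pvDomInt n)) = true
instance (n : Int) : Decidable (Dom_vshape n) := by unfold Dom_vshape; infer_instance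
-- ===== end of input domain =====

-- B replaces the two fill loops + reverse + concatenation by one map with a closed-form entry; same O(n) cost.


-- ===== PORT A =====
-- int(n/2) truncates toward zero; exact as Int.tdiv on the domain (|n| ≤ 2^31 < 2^53, float division exact)
def vshape (n : Int) : List Int :=
  let x := n.tdiv 2
  let left : List Int := List.replicate x.toNat 0
  let right : List Int := List.replicate x.toNat 0
  let right := (PySem.List.pyRange 0 x 1).foldl (fun l i => l.set i.toNat i) right
  let left := (PySem.List.pyRange 0 x 1).foldl (fun l i => l.set i.toNat i) left
  left.reverse ++ right

-- ===== PORT B =====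
def vshape_alt (n : Int) : List Int :=
  let x := n.tdiv 2
  (PySem.List.pyRange 0 (2*x) 1).map (fun j => PySem.Int.floordiv |2*j - (2*x - 1)| 2)

-- ===== PRECONDITION & SPEC =====
def Spec_vshape (n : Int) (out : List Int) : Prop := out = vshape_alt n
instance (n : Int) (out : List Int) : Decidable (Spec_vshape n out) := by unfold Spec_vshape; infer_instance

-- ===== CLAIM (what is proved, stated in full; the proofs are below) =====
def Claim_equal_vshape : Prop := ∀ (n : Int), Dom_vshape n → Spec_vshape n (vshape n)

-- ===== LEMMAS AND PROOFS =====

-- the fill loop turns 'replicate m 0 ++ p' into '(range m) ++ p'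
lemma pv_fill (m : Nat) (p : List Int) :
    ((List.range m).map (Int.ofNat)).foldl (fun l i => l.set i.toNat i)
      (List.replicate m (0:Int) ++ p)
    = (List.range m).map (Int.ofNat) ++ p := by
  induction m generalizing p with
  | zero => simp
  | succ m ih =>
    have hrep : List.replicate (m+1) (0:Int) ++ p
        = List.replicate m (0:Int) ++ ((0:Int) :: p) := by
      simp [List.replicate_succ']
    rw [List.range_succ, List.map_append, List.foldl_append, hrep, ih]
    simp [List.length_map, List.length_range]

lemma pv_range_cast (x : Int) (_hx : 0 ≤ x) :
    PySem.List.pyRange 0 x 1 = (List.range x.toNat).map (Int.ofNat) := by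
  rw [PySem.List.pyRange_one]
  simp

-- ===== VERDICT (by name: the statement is the Claim_ definition above) =====
theorem vshape_spec : Claim_equal_vshape := by
  intro n _
  unfold Spec_vshape
  simp only [vshape, vshape_alt]
  generalize n.tdiv 2 = x
  by_cases hxn : x ≤ 0
  · have h1 : PySem.List.pyRange 0 x 1 = [] := PySem.List.pyRange_one_eq_nil (by omega)
    have h2 : PySem.List.pyRange 0 (2*x) 1 = [] := PySem.List.pyRange_one_eq_nil (by omega)
    have h3 : x.toNat = 0 := by omega
    simp [h1, h2, h3]
  · obtain ⟨m, hxm⟩ : ∃ m : Nat, x = (m : Int) := ⟨x.toNat, by omega⟩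
    subst hxm
    rw [Int.toNat_natCast]
    have hfill : (PySem.List.pyRange 0 (m:Int) 1).foldl (fun l i => l.set i.toNat i)
        (List.replicate m (0:Int)) = (List.range m).map (Int.ofNat) := by
      have := pv_fill m []
      simpa [pv_range_cast (m:Int) (by omega)] using this
    rw [hfill]
    have h2x : PySem.List.pyRange 0 (2*(m:Int)) 1 = (List.range (2*m)).map (Int.ofNat) := by
      rw [pv_range_cast (2*(m:Int)) (by omega)]
      congr 1
    rw [h2x, List.map_map]
    apply List.ext_getElem
    · simp
      omega
    · intro k h1 h2
      simp only [List.length_append, List.length_reverse, List.length_map,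
        List.length_range] at h1
      have hk : k < 2 * m := by omega
      rw [List.getElem_map, List.getElem_range]
      simp only [Function.comp, Int.ofNat_eq_natCast]
      by_cases hkm : k < m
      · rw [List.getElem_append_left (by simpa using hkm)]
        rw [List.getElem_reverse, List.getElem_map, List.getElem_range]
        simp only [List.length_map, List.length_range]
        rw [PySem.Int.floordiv_eq_ediv_of_pos (b := 2) (by norm_num)]
        have hle : 2*(k:Int) - (2*(m:Int) - 1) ≤ 0 := by omega
        rw [abs_of_nonpos hle]
        simp only [Int.ofNat_eq_natCast]
        omega
      · rw [List.getElem_append_right (by simpa using hkm)]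
        simp only [List.length_reverse, List.length_map, List.length_range]
        rw [List.getElem_map, List.getElem_range]
        rw [PySem.Int.floordiv_eq_ediv_of_pos (b := 2) (by norm_num)]
        have hge : 0 ≤ 2*(k:Int) - (2*(m:Int) - 1) := by omega
        rw [abs_of_nonneg hge]
        simp only [Int.ofNat_eq_natCast]
        omega
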